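-- pv_equiv track=rewrite | github.com/john261/aktien-tool | aktien_ki.py | _best_ticker
-- ===== SOURCE A (Python) =====
-- def _best_ticker(quotes):
--     for suffix in [".DE", ".F", ".MU", ".BE"]:
--         for q in quotes:
--             if q.get("symbol", "").endswith(suffix):
--                 return q.get("symbol"), q.get("longname") or q.get("shortname")
--     if quotes:
--         q = quotes[0]
--         return q.get("symbol"), q.get("longname") or q.get("shortname")
--     return None, None
-- ===== SOURCE B (Python) =====
-- def _priority(q):
--     sym = q.get("symbol", "")
--     if sym.endswith(".DE"):
--         return 0
--     if sym.endswith(".F"):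
--         return 1
--     if sym.endswith(".MU"):
--         return 2
--     if sym.endswith(".BE"):
--         return 3
--     return 4
--
--
-- def _best_ticker(quotes):
--     if not quotes:
--         return None, None
--     best = min(quotes, key=_priority)
--     return best.get("symbol"), best.get("longname") or best.get("shortname")
-- ===== Notes on version B (the rewrite author's own statement) =====
-- stated objective: alternative
-- what changed: Replaces A's nested loops (for each suffix, scan all quotes) by a priority function (index of the first matching suffix, 4 if none) and a single min(quotes, key=priority) pass, whose first-minimal tie-breaking reproduces A's suffix-then-position order.
import Mathlib
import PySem

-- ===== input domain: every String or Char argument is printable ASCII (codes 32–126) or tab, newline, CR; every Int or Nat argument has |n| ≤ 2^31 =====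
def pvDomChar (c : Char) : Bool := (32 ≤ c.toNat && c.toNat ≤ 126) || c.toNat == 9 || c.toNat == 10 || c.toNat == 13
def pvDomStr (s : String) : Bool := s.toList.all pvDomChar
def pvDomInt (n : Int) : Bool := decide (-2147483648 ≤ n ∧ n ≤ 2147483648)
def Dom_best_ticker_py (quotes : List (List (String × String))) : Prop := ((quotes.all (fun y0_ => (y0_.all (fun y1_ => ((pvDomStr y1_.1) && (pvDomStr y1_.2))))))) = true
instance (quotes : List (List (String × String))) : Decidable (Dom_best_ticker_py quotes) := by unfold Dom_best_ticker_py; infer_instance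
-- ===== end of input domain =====

-- B replaces A's nested suffix-then-quote scans by a single min-by-priority pass (alternative decomposition, same cost).


-- q.get(k): first-match lookup in the association list (Python dict semantics)
def dget : List (String × String) → String → Option String
  | [], _ => none
  | (k, v) :: t, key => if k == key then some v else dget t key

-- Python `a or b` on Optional[str] values (empty string is falsy)
def pyOr (a b : Option String) : Option String :=
  match a with
  | some s => if s = "" then b else some s
  | none => b

-- the shared return expression: (q.get("symbol"), q.get("longname") or q.get("shortname"))
def mkRes (q : List (String × String)) : Option String × Option String :=
  (dget q "symbol", pyOr (dget q "longname") (dget q "shortname"))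

-- ===== PORT A =====
-- outer `for suffix in [...]` with early return = findSome?; inner `for q in quotes` = find?
def best_ticker_py (quotes : List (List (String × String))) : Option String × Option String :=
  match [".DE", ".F", ".MU", ".BE"].findSome?
      (fun suffix => quotes.find? (fun q => PySem.Str.endswith ((dget q "symbol").getD "") suffix)) with
  | some q => mkRes q
  | none =>
    match quotes with
    | q :: _ => mkRes q
    | [] => (none, none)

-- ===== PORT B =====
def prioAlt (q : List (String × String)) : Nat :=
  if PySem.Str.endswith ((dget q "symbol").getD "") ".DE" then 0
  else if PySem.Str.endswith ((dget q "symbol").getD "") ".F" then 1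
  else if PySem.Str.endswith ((dget q "symbol").getD "") ".MU" then 2
  else if PySem.Str.endswith ((dget q "symbol").getD "") ".BE" then 3
  else 4

def best_ticker_py_alt (quotes : List (List (String × String))) : Option String × Option String :=
  match PySem.List.min? quotes prioAlt with
  | some q => mkRes q
  | none => (none, none)

-- ===== PRECONDITION & SPEC =====
def Spec_best_ticker_py (quotes : List (List (String × String))) (out : Option String × Option String) : Prop := out = best_ticker_py_alt quotes
instance (quotes : List (List (String × String))) (out : Option String × Option String) : Decidable (Spec_best_ticker_py quotes out) := by unfold Spec_best_ticker_py; infer_instance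

-- ===== CLAIM (what is proved, stated in full; the proofs are below) =====
def Claim_equal_best_ticker_py : Prop := ∀ (quotes : List (List (String × String))), Dom_best_ticker_py quotes → Spec_best_ticker_py quotes (best_ticker_py quotes)

-- ===== LEMMAS AND PROOFS =====

-- minimum priority in a list (4 is the top value of prioAlt)
def minP (l : List (List (String × String))) : Nat := l.foldr (fun q m => min (prioAlt q) m) 4

-- running-minimum accumulator of B's min?
def minAcc (b : List (String × String)) (t : List (List (String × String))) : List (String × String) :=
  t.foldl (fun m x => if prioAlt x < prioAlt m then x else m) b

theorem prio_le (q : List (String × String)) : prioAlt q ≤ 4 := by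
  unfold prioAlt; split_ifs <;> omega

theorem minP_le {l : List (List (String × String))} {q : List (String × String)} (h : q ∈ l) :
    minP l ≤ prioAlt q := by
  induction l with
  | nil => cases h
  | cons a t ih =>
    rcases List.mem_cons.mp h with h' | h'
    · subst h'; simp [minP]
    · simp only [minP, List.foldr] at *
      exact le_trans (min_le_right _ _) (ih h')

theorem le_minP {l : List (List (String × String))} {k : Nat} (hk : k ≤ 4)
    (h : ∀ q ∈ l, k ≤ prioAlt q) : k ≤ minP l := by
  induction l with
  | nil => simpa [minP] using hk
  | cons a t ih =>
    simp only [minP, List.foldr] at *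
    exact le_min (h a (by simp)) (ih (fun q hq => h q (by simp [hq])))

theorem find?_mem_congr {α : Type} {p r : α → Bool} :
    ∀ {l : List α}, (∀ a ∈ l, p a = r a) → l.find? p = l.find? r := by
  intro l
  induction l with
  | nil => intro _; rfl
  | cons a t ih =>
    intro h
    simp only [List.find?]
    rw [h a (by simp)]
    cases r a
    · exact ih (fun x hx => h x (by simp [hx]))
    · rfl

theorem min?_acc (t : List (List (String × String))) :
    ∀ b, PySem.List.min? (b :: t) prioAlt = some (minAcc b t) := by
  induction t with
  | nil => intro b; simp [PySem.List.min?, List.foldl, minAcc]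
  | cons x t ih =>
    intro b
    have hstep : PySem.List.min? (b :: x :: t) prioAlt
        = PySem.List.min? ((if prioAlt x < prioAlt b then x else b) :: t) prioAlt := by
      by_cases h : prioAlt x < prioAlt b <;> simp [PySem.List.min?, List.foldl, h]
    have hacc : minAcc b (x :: t) = minAcc (if prioAlt x < prioAlt b then x else b) t := by
      by_cases h : prioAlt x < prioAlt b <;> simp [minAcc, List.foldl, h]
    rw [hstep, ih, hacc]

theorem minAcc_char (t : List (List (String × String))) :
    ∀ b, some (minAcc b t) = (b :: t).find? (fun q => decide (prioAlt q = minP (b :: t))) := by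
  induction t with
  | nil =>
    intro b
    have : minP [b] = prioAlt b := by
      simp [minP, Nat.min_eq_left (prio_le b)]
    simp [minAcc, this]
  | cons x t ih =>
    intro b
    have hM : minP (b :: x :: t) = min (prioAlt (if prioAlt x < prioAlt b then x else b)) (minP t) := by
      by_cases h : prioAlt x < prioAlt b <;>
        simp [minP, List.foldr, h] <;> omega
    by_cases h : prioAlt x < prioAlt b
    · -- b is not minimal: find? skips b
      have hb : ¬ (prioAlt b = minP (b :: x :: t)) := by
        rw [hM]; simp [h]
        intro hbe
        have := min_le_left (prioAlt x) (minP t)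
        omega
      have : minAcc b (x :: t) = minAcc x t := by simp [minAcc, List.foldl, h]
      rw [this, ih x]
      have hM' : minP (x :: t) = minP (b :: x :: t) := by
        rw [hM]; simp [h, minP, List.foldr]
      simp only [List.find?]
      rw [hM']
      simp [hb]
    · have hbx : prioAlt b ≤ prioAlt x := by omega
      have hstep : minAcc b (x :: t) = minAcc b t := by simp [minAcc, List.foldl, h]
      have hM2 : minP (b :: x :: t) = min (prioAlt b) (minP t) := by rw [hM]; simp [h]
      have hM3 : minP (b :: t) = min (prioAlt b) (minP t) := by simp [minP, List.foldr]
      by_cases hb : prioAlt b = minP (b :: x :: t)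
      · -- both find? return b
        rw [hstep, ih b]
        simp only [List.find?]
        rw [hM3, ← hM2]
        simp [hb]
      · have hblt : minP (b :: x :: t) < prioAlt b := by
          have : minP (b :: x :: t) ≤ prioAlt b := minP_le (by simp)
          omega
        have hx : ¬ (prioAlt x = minP (b :: x :: t)) := by omega
        rw [hstep, ih b]
        simp only [List.find?]
        rw [hM3, ← hM2]
        simp [hb, hx]

theorem min?_char (q : List (String × String)) (t : List (List (String × String))) :
    PySem.List.min? (q :: t) prioAlt
      = (q :: t).find? (fun a => decide (prioAlt a = minP (q :: t))) := by
  rw [min?_acc t q, minAcc_char t q]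

-- the e-booleans
theorem prio_eq_zero_iff (q : List (String × String)) :
    (decide (prioAlt q = 0)) = PySem.Str.endswith ((dget q "symbol").getD "") ".DE" := by
  unfold prioAlt; split_ifs <;> simp_all

theorem prio_eq_one_iff (q : List (String × String))
    (h0 : PySem.Str.endswith ((dget q "symbol").getD "") ".DE" = false) :
    (decide (prioAlt q = 1)) = PySem.Str.endswith ((dget q "symbol").getD "") ".F" := by
  unfold prioAlt; split_ifs <;> simp_all

theorem prio_eq_two_iff (q : List (String × String))
    (h0 : PySem.Str.endswith ((dget q "symbol").getD "") ".DE" = false)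
    (h1 : PySem.Str.endswith ((dget q "symbol").getD "") ".F" = false) :
    (decide (prioAlt q = 2)) = PySem.Str.endswith ((dget q "symbol").getD "") ".MU" := by
  unfold prioAlt; split_ifs <;> simp_all

theorem prio_eq_three_iff (q : List (String × String))
    (h0 : PySem.Str.endswith ((dget q "symbol").getD "") ".DE" = false)
    (h1 : PySem.Str.endswith ((dget q "symbol").getD "") ".F" = false)
    (h2 : PySem.Str.endswith ((dget q "symbol").getD "") ".MU" = false) :
    (decide (prioAlt q = 3)) = PySem.Str.endswith ((dget q "symbol").getD "") ".BE" := by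
  unfold prioAlt; split_ifs <;> simp_all

theorem prio_eq_four (q : List (String × String))
    (h0 : PySem.Str.endswith ((dget q "symbol").getD "") ".DE" = false)
    (h1 : PySem.Str.endswith ((dget q "symbol").getD "") ".F" = false)
    (h2 : PySem.Str.endswith ((dget q "symbol").getD "") ".MU" = false)
    (h3 : PySem.Str.endswith ((dget q "symbol").getD "") ".BE" = false) :
    prioAlt q = 4 := by
  unfold prioAlt; split_ifs <;> simp_all

theorem prio_ge1 (q : List (String × String))
    (h0 : PySem.Str.endswith ((dget q "symbol").getD "") ".DE" = false) :
    1 ≤ prioAlt q := by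
  unfold prioAlt; split_ifs <;> simp_all

theorem prio_ge2 (q : List (String × String))
    (h0 : PySem.Str.endswith ((dget q "symbol").getD "") ".DE" = false)
    (h1 : PySem.Str.endswith ((dget q "symbol").getD "") ".F" = false) :
    2 ≤ prioAlt q := by
  unfold prioAlt; split_ifs <;> simp_all

theorem prio_ge3 (q : List (String × String))
    (h0 : PySem.Str.endswith ((dget q "symbol").getD "") ".DE" = false)
    (h1 : PySem.Str.endswith ((dget q "symbol").getD "") ".F" = false)
    (h2 : PySem.Str.endswith ((dget q "symbol").getD "") ".MU" = false) :
    3 ≤ prioAlt q := by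
  unfold prioAlt; split_ifs <;> simp_all

-- ===== VERDICT (by name: the statement is the Claim_ definition above) =====
theorem best_ticker_py_spec : Claim_equal_best_ticker_py := by
  intro quotes _
  unfold Spec_best_ticker_py best_ticker_py best_ticker_py_alt
  cases quotes with
  | nil => rfl
  | cons q t =>
    rw [min?_char q t]
    simp only [List.findSome?]
    rcases h0 : (q :: t).find? (fun a => PySem.Str.endswith ((dget a "symbol").getD "") ".DE") with _ | q0
    case some =>
      have hmem := List.mem_of_find?_eq_some h0
      have he : PySem.Str.endswith ((dget q0 "symbol").getD "") ".DE" = true := by simpa using List.find?_some h0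
      have hp0 : prioAlt q0 = 0 := by
        have := prio_eq_zero_iff q0; rw [he] at this; exact of_decide_eq_true this
      have hM : minP (q :: t) = 0 := Nat.le_zero.mp (hp0 ▸ minP_le hmem)
      rw [hM]
      rw [find?_mem_congr (fun a _ => prio_eq_zero_iff a), h0]
    case none =>
      have H0 : ∀ a ∈ (q :: t), PySem.Str.endswith ((dget a "symbol").getD "") ".DE" = false := by
        intro a ha
        simpa using List.find?_eq_none.mp h0 a ha
      rcases h1 : (q :: t).find? (fun a => PySem.Str.endswith ((dget a "symbol").getD "") ".F") with _ | q1
      case some =>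
        have hmem := List.mem_of_find?_eq_some h1
        have he : PySem.Str.endswith ((dget q1 "symbol").getD "") ".F" = true := by simpa using List.find?_some h1
        have hp : prioAlt q1 = 1 := by
          have := prio_eq_one_iff q1 (H0 q1 hmem); rw [he] at this; exact of_decide_eq_true this
        have hM : minP (q :: t) = 1 := by
          have hu : minP (q :: t) ≤ 1 := hp ▸ minP_le hmem
          have hl : 1 ≤ minP (q :: t) := le_minP (by omega) (fun a ha => prio_ge1 a (H0 a ha))
          omega
        rw [hM]
        rw [find?_mem_congr (fun a ha => prio_eq_one_iff a (H0 a ha)), h1]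
      case none =>
        have H1 : ∀ a ∈ (q :: t), PySem.Str.endswith ((dget a "symbol").getD "") ".F" = false := by
          intro a ha
          simpa using List.find?_eq_none.mp h1 a ha
        rcases h2 : (q :: t).find? (fun a => PySem.Str.endswith ((dget a "symbol").getD "") ".MU") with _ | q2
        case some =>
          have hmem := List.mem_of_find?_eq_some h2
          have he : PySem.Str.endswith ((dget q2 "symbol").getD "") ".MU" = true := by simpa using List.find?_some h2
          have hp : prioAlt q2 = 2 := by
            have := prio_eq_two_iff q2 (H0 q2 hmem) (H1 q2 hmem); rw [he] at this
            exact of_decide_eq_true this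
          have hM : minP (q :: t) = 2 := by
            have hu : minP (q :: t) ≤ 2 := hp ▸ minP_le hmem
            have hl : 2 ≤ minP (q :: t) :=
              le_minP (by omega) (fun a ha => prio_ge2 a (H0 a ha) (H1 a ha))
            omega
          rw [hM]
          rw [find?_mem_congr (fun a ha => prio_eq_two_iff a (H0 a ha) (H1 a ha)), h2]
        case none =>
          have H2 : ∀ a ∈ (q :: t), PySem.Str.endswith ((dget a "symbol").getD "") ".MU" = false := by
            intro a ha
            simpa using List.find?_eq_none.mp h2 a ha
          rcases h3 : (q :: t).find? (fun a => PySem.Str.endswith ((dget a "symbol").getD "") ".BE") with _ | q3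
          case some =>
            have hmem := List.mem_of_find?_eq_some h3
            have he : PySem.Str.endswith ((dget q3 "symbol").getD "") ".BE" = true := by simpa using List.find?_some h3
            have hp : prioAlt q3 = 3 := by
              have := prio_eq_three_iff q3 (H0 q3 hmem) (H1 q3 hmem) (H2 q3 hmem); rw [he] at this
              exact of_decide_eq_true this
            have hM : minP (q :: t) = 3 := by
              have hu : minP (q :: t) ≤ 3 := hp ▸ minP_le hmem
              have hl : 3 ≤ minP (q :: t) :=
                le_minP (by omega) (fun a ha => prio_ge3 a (H0 a ha) (H1 a ha) (H2 a ha))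
              omega
            rw [hM]
            rw [find?_mem_congr (fun a ha => prio_eq_three_iff a (H0 a ha) (H1 a ha) (H2 a ha)), h3]
          case none =>
            have H3 : ∀ a ∈ (q :: t), PySem.Str.endswith ((dget a "symbol").getD "") ".BE" = false := by
              intro a ha
              simpa using List.find?_eq_none.mp h3 a ha
            have Hp : ∀ a ∈ (q :: t), prioAlt a = 4 := fun a ha =>
              prio_eq_four a (H0 a ha) (H1 a ha) (H2 a ha) (H3 a ha)
            have hM : minP (q :: t) = 4 := by
              have hu : minP (q :: t) ≤ 4 := (Hp q (by simp)) ▸ minP_le (by simp)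
              have hl : 4 ≤ minP (q :: t) :=
                le_minP (by omega) (fun a ha => by rw [Hp a ha])
              omega
            rw [hM]
            simp [List.find?, Hp q (by simp)]
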